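-- pv_equiv track=rewrite | github.com/pypy/pypy | pypy/translator/genc_repr.py | manglestr
-- ===== SOURCE A (Python) =====
-- def manglestr(s):
--     "Return an identifier name unique for the string 's'."
--     l = []
--     for c in s:
--         if not ('a' <= c <= 'z' or 'A' <= c <= 'Z' or '0' <= c <= '9'):
--             if c == '_':
--                 c = '__'
--             else:
--                 c = '_%02x' % ord(c)
--         l.append(c)
--     return ''.join(l)
-- ===== SOURCE B (Python) =====
-- # Run-based rewrite: instead of mapping each character one by one, scan with two
-- # pointers, copy whole maximal runs of identifier characters as slices, and only
-- # escape the single characters between runs.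
--
-- def _isaln(c):
--     return 'a' <= c <= 'z' or 'A' <= c <= 'Z' or '0' <= c <= '9'
--
-- def manglestr(s):
--     "Return an identifier name unique for the string 's'."
--     out = []
--     i, n = 0, len(s)
--     while i < n:
--         c = s[i]
--         if _isaln(c):
--             j = i + 1
--             while j < n and _isaln(s[j]):
--                 j += 1
--             out.append(s[i:j])
--             i = j
--         else:
--             out.append('__' if c == '_' else '_%02x' % ord(c))
--             i += 1
--     return ''.join(out)
-- ===== Notes on version B (the rewrite author's own statement) =====
-- stated objective: alternative
-- what changed: Replaced the per-character branch-and-append loop by a two-pointer run scanner that copies maximal alphanumeric runs as whole slices and escapes only the characters between runs.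
import Mathlib
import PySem

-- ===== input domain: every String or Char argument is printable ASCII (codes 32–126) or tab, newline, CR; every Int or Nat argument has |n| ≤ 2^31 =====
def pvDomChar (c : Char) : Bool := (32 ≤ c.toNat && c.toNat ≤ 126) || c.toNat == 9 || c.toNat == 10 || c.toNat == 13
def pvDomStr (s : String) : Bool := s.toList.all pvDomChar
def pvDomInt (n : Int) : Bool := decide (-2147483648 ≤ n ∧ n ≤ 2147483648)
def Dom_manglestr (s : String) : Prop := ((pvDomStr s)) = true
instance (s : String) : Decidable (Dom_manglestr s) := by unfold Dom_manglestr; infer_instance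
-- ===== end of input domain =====

-- B replaces A's per-character branch-and-append loop by a two-pointer run scanner
-- that copies maximal alphanumeric runs as whole slices (alternative; return value only).

-- lower-case hex digit (exact for 0 ≤ n ≤ 15)
def pvHexDig (n : Nat) : Char := if n < 10 then Char.ofNat (48 + n) else Char.ofNat (87 + n)

-- 'a' <= c <= 'z' or 'A' <= c <= 'Z' or '0' <= c <= '9'
def pvIsAln (c : Char) : Bool := ('a' ≤ c && c ≤ 'z') || ('A' ≤ c && c ≤ 'Z') || ('0' ≤ c && c ≤ '9')

-- ===== PORT A =====
-- '_%02x' % ord(c): exact for ord(c) ≤ 255, hence on all of Dom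
def manglestr (s : String) : String :=
  PySem.Str.join "" (s.toList.foldl (fun l c =>
    l ++ [ if !pvIsAln c then
             (if c = '_' then "__" else String.ofList ['_', pvHexDig (c.toNat / 16), pvHexDig (c.toNat % 16)])
           else String.ofList [c] ]) [])

-- ===== PORT B =====
-- '__' if c == '_' else '_%02x' % ord(c)
def pvEsc (c : Char) : List Char :=
  if c = '_' then ['_', '_'] else ['_', pvHexDig (c.toNat / 16), pvHexDig (c.toNat % 16)]

-- Source B's while loop: at an alphanumeric position copy the whole maximal run s[i:j]
-- (takeWhile), jump past it (dropWhile); otherwise escape the one char and advance.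
def pvRuns : List Char → List Char
  | [] => []
  | c :: rest =>
    if pvIsAln c then
      (c :: rest).takeWhile pvIsAln ++ pvRuns (rest.dropWhile pvIsAln)
    else pvEsc c ++ pvRuns rest
termination_by cs => cs.length
decreasing_by
  · have := List.length_dropWhile_le pvIsAln rest
    simp; omega
  · simp

def manglestr_alt (s : String) : String :=
  String.ofList (pvRuns s.toList)

-- ===== PRECONDITION & SPEC =====
def Spec_manglestr (s : String) (out : String) : Prop := out = manglestr_alt s
instance (s : String) (out : String) : Decidable (Spec_manglestr s out) := by unfold Spec_manglestr; infer_instance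

-- ===== CLAIM (what is proved, stated in full; the proofs are below) =====
def Claim_equal_manglestr : Prop := ∀ (s : String), Dom_manglestr s → Spec_manglestr s (manglestr s)

-- ===== LEMMAS AND PROOFS =====

-- per-character conversion, the common denominator of the two ports
def pvConvL (c : Char) : List Char := if pvIsAln c then [c] else pvEsc c

lemma pv_convA_toList (c : Char) :
    (if !pvIsAln c then
       (if c = '_' then "__" else String.ofList ['_', pvHexDig (c.toNat / 16), pvHexDig (c.toNat % 16)])
     else String.ofList [c]).toList = pvConvL c := by
  unfold pvConvL pvEsc
  cases h : pvIsAln c <;> split_ifs <;> simp_all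

lemma pv_join_nil_flatten (xs : List (List Char)) : PySem.Chars.join [] xs = xs.flatten := by
  induction xs with
  | nil => simp [PySem.Chars.join_nil]
  | cons a l ih =>
    cases l with
    | nil => simp [PySem.Chars.join_singleton]
    | cons b r => rw [PySem.Chars.join_cons_cons]; simp [ih]

-- A's result is the per-character flatMap
lemma pv_A_flatMap (cs : List Char) :
    PySem.Str.join "" (cs.foldl (fun l c =>
      l ++ [ if !pvIsAln c then
               (if c = '_' then "__" else String.ofList ['_', pvHexDig (c.toNat / 16), pvHexDig (c.toNat % 16)])
             else String.ofList [c] ]) []) = String.ofList (cs.flatMap pvConvL) := by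
  rw [PySem.List.foldl_append_singleton_eq_map]
  apply String.ext
  rw [PySem.Str.toList_join]
  simp only [List.map_map, List.nil_append, String.toList_ofList]
  have hsep : ("" : String).toList = ([] : List Char) := rfl
  rw [hsep, pv_join_nil_flatten, List.flatMap_def]
  congr 1
  exact List.map_congr_left (fun c _ => pv_convA_toList c)

-- an all-alphanumeric run maps to itself
lemma pv_flatMap_aln (cs : List Char) (h : ∀ c ∈ cs, pvIsAln c = true) :
    cs.flatMap pvConvL = cs := by
  induction cs with
  | nil => rfl
  | cons c rest ih =>
    simp only [List.flatMap_cons, pvConvL, h c (by simp)]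
    simp [ih (fun d hd => h d (by simp [hd]))]

-- B's run scanner is the same flatMap
lemma pv_B_flatMap (cs : List Char) : pvRuns cs = cs.flatMap pvConvL := by
  induction cs using pvRuns.induct with
  | case1 => simp [pvRuns]
  | case2 c rest h ih =>
    rw [pvRuns]
    simp only [h, if_true]
    have hrun : ∀ d ∈ (c :: rest).takeWhile pvIsAln, pvIsAln d = true :=
      fun d hd => List.mem_takeWhile_imp hd
    conv_rhs => rw [← List.takeWhile_append_dropWhile (p := pvIsAln) (l := c :: rest)]
    rw [List.flatMap_append, pv_flatMap_aln _ hrun, List.dropWhile_cons_of_pos h, ih]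
  | case3 c rest h ih =>
    rw [pvRuns]
    simp only [h, Bool.false_eq_true, if_false]
    simp [List.flatMap_cons, pvConvL, h, ih]

-- ===== VERDICT (by name: the statement is the Claim_ definition above) =====
theorem manglestr_spec : Claim_equal_manglestr := by
  intro s _
  unfold Spec_manglestr manglestr manglestr_alt
  rw [pv_A_flatMap, pv_B_flatMap]
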